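-- pv_equiv track=rewrite | github.com/kyileiaye2021/CodePath_TIP101 | Unit3/Unit3_Session1/Version2/Prob6.py | find_the_needle
-- ===== SOURCE A (Python) =====
-- def find_the_needle(haystack, needle):
--   left, right = 0, 0
--
--   for char in haystack:
--     if char in needle:
--       right += 1
--       if len(needle) == right - left:
--         return left
--
--     else:
--       right += 1
--       left = right
--
--   return -1
-- ===== SOURCE B (Python) =====
-- def find_the_needle(haystack, needle):
--     # run-based scan: split haystack into maximal runs of equal charset-membership
--     i = 0
--     n = len(haystack)
--     while i < n:
--         k = haystack[i] in needle
--         j = i + 1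
--         while j < n and (haystack[j] in needle) == k:
--             j += 1
--         if k and j - i >= len(needle):
--             return i
--         i = j
--     return -1
-- ===== Notes on version B (the rewrite author's own statement) =====
-- stated objective: alternative
-- what changed: A is a per-character state machine tracking left/right pointers; B instead scans maximal runs of equal charset-membership (a groupby-style span loop) and returns the start of the first in-charset run of length >= len(needle).
import Mathlib
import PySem

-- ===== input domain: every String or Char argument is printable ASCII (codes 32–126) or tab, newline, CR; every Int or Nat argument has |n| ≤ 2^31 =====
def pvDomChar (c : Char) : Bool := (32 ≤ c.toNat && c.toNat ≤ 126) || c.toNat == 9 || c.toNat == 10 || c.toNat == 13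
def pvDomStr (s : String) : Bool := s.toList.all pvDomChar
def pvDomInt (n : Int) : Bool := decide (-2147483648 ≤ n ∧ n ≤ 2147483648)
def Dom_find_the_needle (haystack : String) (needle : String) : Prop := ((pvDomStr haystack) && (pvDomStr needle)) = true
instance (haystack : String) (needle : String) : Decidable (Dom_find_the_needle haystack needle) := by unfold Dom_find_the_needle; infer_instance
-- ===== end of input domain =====

-- B replaces A's per-character left/right state machine by a groupby-style scan over maximal
-- runs of equal charset-membership (objective: alternative decomposition, no speed claim).

-- ===== PORT A =====
-- A's for-loop over haystack with (left, right) state and two early-return-free branches;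
-- 'char in needle' on a single char is exactly List.contains on the chars.
def pvGoA (nd : List Char) : List Char → Int → Int → Int
  | [], _, _ => -1
  | c :: cs, left, right =>
    if nd.contains c then
      if (nd.length : Int) == right + 1 - left then left
      else pvGoA nd cs left (right + 1)
    else pvGoA nd cs (right + 1) (right + 1)

def find_the_needle (haystack : String) (needle : String) : Int :=
  pvGoA needle.toList haystack.toList 0 0

-- ===== PORT B =====
-- B's outer while-loop; the inner while (extend j over the run) is the span/takeWhile of the tail.
def pvGoB (nd : List Char) : List Char → Int → Int
  | [], _ => -1
  | c :: cs, i =>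
    let k := nd.contains c
    let run := cs.takeWhile (fun d => nd.contains d == k)
    let rest := cs.dropWhile (fun d => nd.contains d == k)
    if k && ((nd.length : Int) ≤ 1 + run.length) then i
    else pvGoB nd rest (i + 1 + run.length)
termination_by cs => cs.length
decreasing_by
  exact Nat.lt_succ_of_le (List.length_dropWhile_le _ _)

def find_the_needle_alt (haystack : String) (needle : String) : Int :=
  pvGoB needle.toList haystack.toList 0

-- ===== PRECONDITION & SPEC =====
def Spec_find_the_needle (haystack : String) (needle : String) (out : Int) : Prop := out = find_the_needle_alt haystack needle
instance (haystack : String) (needle : String) (out : Int) : Decidable (Spec_find_the_needle haystack needle out) := by unfold Spec_find_the_needle; infer_instance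

-- ===== CLAIM (what is proved, stated in full; the proofs are below) =====
def Claim_equal_find_the_needle : Prop := ∀ (haystack : String) (needle : String), Dom_find_the_needle haystack needle → Spec_find_the_needle haystack needle (find_the_needle haystack needle)

-- ===== LEMMAS AND PROOFS =====

-- A skips a run of out-of-charset chars by resetting left to right at each of them.
theorem pvGoA_false_run (nd : List Char) (run : List Char)
    (h : ∀ c ∈ run, nd.contains c = false) (rest : List Char) (q : Int) :
    pvGoA nd (run ++ rest) q q = pvGoA nd rest (q + run.length) (q + run.length) := by
  induction run generalizing q with
  | nil => simp
  | cons e run' ih =>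
    have he : nd.contains e = false := h e (by simp)
    simp only [List.cons_append, pvGoA, he, if_false, Bool.false_eq_true]
    rw [ih (fun c hc => h c (by simp [hc])) (q + 1)]
    congr 1 <;> · simp only [List.length_cons]; push_cast; ring

-- A inside a run of in-charset chars: returns the run start q iff the run reaches length nd.length.
theorem pvGoA_true_run (nd : List Char) (run : List Char)
    (h : ∀ c ∈ run, nd.contains c = true) (rest : List Char) (q : Int) (r : Nat)
    (hr : r < nd.length) :
    pvGoA nd (run ++ rest) q (q + r) =
      if nd.length ≤ r + run.length then q
      else pvGoA nd rest q (q + r + run.length) := by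
  induction run generalizing r with
  | nil =>
    rw [if_neg (by simp only [List.length_nil]; omega)]
    simp
  | cons e run' ih =>
    have he : nd.contains e = true := h e (by simp)
    simp only [List.cons_append, pvGoA, he, if_true]
    by_cases hn : nd.length = r + 1
    · have : ((nd.length : Int) == q + ↑r + 1 - q) = true := by
        simp only [beq_iff_eq]; omega
      rw [this]
      simp only [if_true]
      rw [if_pos (by simp only [List.length_cons]; omega)]
    · have hne : ((nd.length : Int) == q + ↑r + 1 - q) = false := by
        simp only [beq_eq_false_iff_ne, ne_eq]
        intro hEq; exact hn (by omega)
      rw [hne]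
      simp only [Bool.false_eq_true, if_false]
      have h1 : q + (r : Int) + 1 = q + ((r + 1 : Nat) : Int) := by push_cast; ring
      rw [h1, ih (fun c hc => h c (by simp [hc])) (r + 1) (by omega)]
      by_cases hc2 : nd.length ≤ r + 1 + run'.length
      · rw [if_pos hc2, if_pos (by simp only [List.length_cons]; omega)]
      · rw [if_neg hc2, if_neg (by simp only [List.length_cons]; omega)]
        congr 1
        simp only [List.length_cons]; push_cast; ring

-- head of dropWhile fails the predicate
theorem pvHeadRest {p : Char → Bool} {l : List Char} {d : Char} {ds : List Char}
    (h : l.dropWhile p = d :: ds) : p d = false := by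
  have := List.head?_dropWhile_not p l
  rw [h] at this
  exact this

-- unfolding lemmas for the well-founded pvGoB
theorem pvGoB_nil (nd : List Char) (i : Int) : pvGoB nd [] i = -1 := by
  rw [pvGoB]

theorem pvGoB_cons (nd : List Char) (c : Char) (cs : List Char) (i : Int) :
    pvGoB nd (c :: cs) i =
      if nd.contains c &&
          decide ((nd.length : Int) ≤ 1 + ((cs.takeWhile (fun d => nd.contains d == nd.contains c)).length : Int)) then i
      else pvGoB nd (cs.dropWhile (fun d => nd.contains d == nd.contains c))
        (i + 1 + ((cs.takeWhile (fun d => nd.contains d == nd.contains c)).length : Int)) := by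
  rw [pvGoB]

theorem pvMain (nd : List Char) : ∀ (k : Nat) (cs : List Char), cs.length ≤ k →
    ∀ pos : Int, pvGoA nd cs pos pos = pvGoB nd cs pos := by
  intro k
  induction k with
  | zero =>
    intro cs hcs pos
    have : cs = [] := List.eq_nil_of_length_eq_zero (Nat.le_zero.mp hcs)
    subst this
    simp [pvGoA, pvGoB_nil]
  | succ k ih =>
    intro cs hcs pos
    match cs with
    | [] => simp [pvGoA, pvGoB_nil]
    | c :: cs' =>
      have hcs' : cs'.length ≤ k := by simp only [List.length_cons] at hcs; omega
      rw [pvGoB_cons]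
      by_cases hc : nd.contains c = true
      · -- c is in the charset: a True run starts here
        simp only [hc]
        have hruntrue : ∀ x ∈ cs'.takeWhile (fun d => nd.contains d == true),
            nd.contains x = true := by
          intro x hx
          have h5 := List.mem_takeWhile_imp hx
          revert h5
          cases nd.contains x <;> simp
        have hsplit : cs' = cs'.takeWhile (fun d => nd.contains d == true) ++
            cs'.dropWhile (fun d => nd.contains d == true) :=
          (List.takeWhile_append_dropWhile).symm
        have hn1 : 1 ≤ nd.length := by
          have hm : c ∈ nd := by simpa using hc
          cases nd with
          | nil => cases hm
          | cons _ _ => simp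
        simp only [pvGoA, hc, if_true]
        by_cases h2 : nd.length ≤ 1 + (cs'.takeWhile (fun d => nd.contains d == true)).length
        · -- the run (c plus its takeWhile extension) reaches the needle length: both return pos
          have hcond : (true && decide ((nd.length : Int) ≤
              1 + ((cs'.takeWhile (fun d => nd.contains d == true)).length : Int))) = true := by
            simp only [Bool.true_and, decide_eq_true_eq]; omega
          rw [if_pos hcond]
          by_cases hone : nd.length = 1
          · have hb : ((nd.length : Int) == pos + 1 - pos) = true := by
              simp only [beq_iff_eq]; omega
            rw [if_pos hb]
          · have hb : ((nd.length : Int) == pos + 1 - pos) = false := by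
              simp only [beq_eq_false_iff_ne, ne_eq]
              intro hEq; exact hone (by omega)
            have hbn : ¬ (((nd.length : Int) == pos + 1 - pos) = true) := by
              rw [hb]; exact Bool.false_ne_true
            rw [if_neg hbn]
            have hA := pvGoA_true_run nd _ hruntrue
              (cs'.dropWhile (fun d => nd.contains d == true)) pos 1 (by omega)
            rw [← hsplit] at hA
            have h1 : pos + (1 : Int) = pos + ((1 : Nat) : Int) := by norm_num
            rw [h1, hA, if_pos (by omega)]
        · -- the run is too short: both continue after it
          have hcond : (true && decide ((nd.length : Int) ≤
              1 + ((cs'.takeWhile (fun d => nd.contains d == true)).length : Int))) = false := by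
            simp only [Bool.true_and, decide_eq_false_iff_not]; omega
          have hcondn : ¬ ((true && decide ((nd.length : Int) ≤
              1 + ((cs'.takeWhile (fun d => nd.contains d == true)).length : Int))) = true) := by
            rw [hcond]; exact Bool.false_ne_true
          rw [if_neg hcondn]
          have hb : ((nd.length : Int) == pos + 1 - pos) = false := by
            simp only [beq_eq_false_iff_ne, ne_eq]
            intro hEq; exact h2 (by omega)
          have hbn : ¬ (((nd.length : Int) == pos + 1 - pos) = true) := by
            rw [hb]; exact Bool.false_ne_true
          rw [if_neg hbn]
          have hA := pvGoA_true_run nd _ hruntrue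
            (cs'.dropWhile (fun d => nd.contains d == true)) pos 1 (by omega)
          rw [← hsplit] at hA
          have h1 : pos + (1 : Int) = pos + ((1 : Nat) : Int) := by norm_num
          rw [h1, hA, if_neg (by omega)]
          have h3 : pos + ((1 : Nat) : Int) +
              ((cs'.takeWhile (fun d => nd.contains d == true)).length : Int) =
              pos + 1 + ((cs'.takeWhile (fun d => nd.contains d == true)).length : Int) := by
            push_cast; ring
          rw [h3]
          -- the remainder after the True run: empty, or starts with an out-of-charset char
          cases hrest : cs'.dropWhile (fun d => nd.contains d == true) with
          | nil => rw [pvGoB_nil]; simp [pvGoA]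
          | cons d ds =>
            have hd : nd.contains d = false := by
              have h6 := pvHeadRest hrest
              revert h6
              cases nd.contains d <;> simp
            have hds : ds.length ≤ k := by
              have h4 : (cs'.dropWhile (fun d => nd.contains d == true)).length ≤ cs'.length :=
                List.length_dropWhile_le _ _
              rw [hrest] at h4
              simp only [List.length_cons] at h4
              omega
            simp only [pvGoA, hd, Bool.false_eq_true, if_false]
            rw [ih ds hds]
            rw [pvGoB_cons]
            simp only [hd, Bool.false_and, Bool.false_eq_true, if_false]
            -- LHS walks ds from the next position; RHS skips the whole False run of d :: ds
            cases ds with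
            | nil => simp [pvGoB_nil]
            | cons e es =>
              by_cases hce : nd.contains e = true
              · rw [List.takeWhile_cons_of_neg (by rw [hce]; decide),
                    List.dropWhile_cons_of_neg (by rw [hce]; decide)]
                congr 1
                simp
              · have hcef : nd.contains e = false := by
                  revert hce; cases nd.contains e <;> simp
                rw [pvGoB_cons]
                simp only [hcef, Bool.false_and, Bool.false_eq_true, if_false]
                rw [List.takeWhile_cons_of_pos (by rw [hcef]; decide),
                    List.dropWhile_cons_of_pos (by rw [hcef]; decide)]
                congr 1
                simp only [List.length_cons]
                push_cast; ring
      · -- c is out of the charset: both skip the False run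
        have hcf : nd.contains c = false := by
          revert hc; cases nd.contains c <;> simp
        simp only [hcf]
        have hrunfalse : ∀ x ∈ cs'.takeWhile (fun d => nd.contains d == false),
            nd.contains x = false := by
          intro x hx
          have h5 := List.mem_takeWhile_imp hx
          revert h5
          cases nd.contains x <;> simp
        have hsplitF : cs' = cs'.takeWhile (fun d => nd.contains d == false) ++
            cs'.dropWhile (fun d => nd.contains d == false) :=
          (List.takeWhile_append_dropWhile).symm
        have hA := pvGoA_false_run nd _ hrunfalse
          (cs'.dropWhile (fun d => nd.contains d == false)) (pos + 1)
        rw [← hsplitF] at hA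
        simp only [pvGoA, hcf, Bool.false_eq_true, if_false, Bool.false_and]
        rw [hA]
        have hrl : (cs'.dropWhile (fun d => nd.contains d == false)).length ≤ k := by
          have h4 : (cs'.dropWhile (fun d => nd.contains d == false)).length ≤ cs'.length :=
            List.length_dropWhile_le _ _
          omega
        rw [ih _ hrl]

-- ===== VERDICT (by name: the statement is the Claim_ definition above) =====
theorem find_the_needle_spec : Claim_equal_find_the_needle := by
  intro haystack needle _
  unfold Spec_find_the_needle find_the_needle find_the_needle_alt
  exact pvMain needle.toList haystack.toList.length haystack.toList (le_refl _) 0
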